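-- pv_equiv track=rewrite | github.com/lv300-max/collatz-certificate-workbench | export_danger_pair_certificates.py | find_valid_k
-- ===== SOURCE A (Python) =====
-- KMAX = 16
--
-- MAX_STEPS = 10_000
--
-- MAX_K_VALID = 500
--
-- def compute_descent(r, k, max_steps=MAX_STEPS):
--     a, b, c = 1, 0, 0
--     n = r
--     valid = True
--     odd_count = 0
--     for m in range(1, max_steps + 1):
--         if c >= k:
--             valid = False
--         if n % 2 == 0:
--             c += 1
--             n >>= 1
--         else:
--             a = 3 * a
--             b = 3 * b + (1 << c)
--             n = 3 * n + 1
--             odd_count += 1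
--         two_c = 1 << c
--         if two_c > a:
--             B = (b + two_c - a - 1) // (two_c - a)
--             return m, a, b, c, B, valid, odd_count
--     return None
--
-- def find_valid_k(r, k_min=KMAX, max_k=MAX_K_VALID):
--     for k in range(k_min, max_k + 1):
--         rep = r % (1 << k)
--         if rep % 2 == 0:
--             continue
--         res = compute_descent(rep, k)
--         if res is not None and res[5]:
--             return k, res
--     return None, None
-- ===== SOURCE B (Python) =====
-- KMAX = 16
--
-- MAX_STEPS = 10_000
--
-- MAX_K_VALID = 500
--
-- def _trajectory(n, max_steps=MAX_STEPS):
--     # Parity list of the descent (True = even step), stopping at the first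
--     # step after which 2**evens > 3**odds; None if max_steps is exhausted.
--     pars = []
--     c = o = 0
--     while len(pars) < max_steps:
--         if n % 2 == 0:
--             pars.append(True)
--             c += 1
--             n >>= 1
--         else:
--             pars.append(False)
--             o += 1
--             n = 3 * n + 1
--         if (1 << c) > 3 ** o:
--             return pars
--     return None
--
-- def find_valid_k(r, k_min=KMAX, max_k=MAX_K_VALID):
--     if r % 2 == 0:
--         return None, None          # every residue r mod 2**k is even
--     for k in range(max(k_min, 1), max_k + 1):
--         rep = r % (1 << k)
--         pars = _trajectory(rep)
--         if pars is None:
--             continue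
--         # second pass: fold the parity list back into (a, b, c, odd)
--         a, b, c, odd = 1, 0, 0, 0
--         for p in pars:
--             if p:
--                 c += 1
--             else:
--                 a, b, odd = 3 * a, 3 * b + (1 << c), odd + 1
--         c_last = c - 1 if pars[-1] else c  # c seen by the final validity check
--         if c_last < k:
--             two_c = 1 << c
--             B = (b + two_c - a - 1) // (two_c - a)
--             return k, (len(pars), a, b, c, B, True, odd)
--     return None, None
-- ===== Notes on version B (the rewrite author's own statement) =====
-- stated objective: alternative
-- what changed: B rejects even r up front and replaces A's flag-threading single-pass descent by two stages: it first builds the parity trajectory of the residue (tracking only the even/odd counts for the 2^c > 3^odd stopping rule), then folds that parity list back into (a,b,c,odd), reads validity off the last parity (largest checked even-count < k) and only then forms the ceiling bound B.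
import Mathlib
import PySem

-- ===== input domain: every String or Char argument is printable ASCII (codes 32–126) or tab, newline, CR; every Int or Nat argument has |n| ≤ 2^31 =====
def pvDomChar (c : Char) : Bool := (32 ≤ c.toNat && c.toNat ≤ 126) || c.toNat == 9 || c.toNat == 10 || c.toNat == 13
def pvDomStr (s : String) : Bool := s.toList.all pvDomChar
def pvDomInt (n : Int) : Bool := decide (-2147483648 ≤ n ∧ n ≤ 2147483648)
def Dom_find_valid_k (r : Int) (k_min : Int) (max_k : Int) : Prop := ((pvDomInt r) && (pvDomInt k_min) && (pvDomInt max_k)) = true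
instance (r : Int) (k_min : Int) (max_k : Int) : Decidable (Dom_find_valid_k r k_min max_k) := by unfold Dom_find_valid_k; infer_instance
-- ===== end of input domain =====

-- B rejects even r up front and splits the descent into two stages: build the parity
-- trajectory first, then fold it back into (a,b,c,odd) and read validity off the last
-- parity (objective: alternative; same cost).

-- ===== PORT A =====
-- 1 << k; exact for 0 ≤ k (Pre_ excludes the negative shifts, on which Python raises)
def pvPow2 (k : Int) : Int := Int.ofNat (1 <<< k.toNat)

-- the for-m loop of compute_descent, state (m, a, b, c, n, valid, odd_count)
def descentA (k : Int) : Nat → Int → Int → Int → Int → Int → Bool → Int →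
    Option (Int × Int × Int × Int × Int × Bool × Int)
  | 0, _, _, _, _, _, _, _ => none
  | fuel+1, m, a, b, c, n, valid, odd =>
    let valid' := if k ≤ c then false else valid
    if PySem.Int.mod n 2 = 0 then
      let two_c := pvPow2 (c + 1)
      if two_c > a then
        some (m, a, b, c + 1, PySem.Int.floordiv (b + two_c - a - 1) (two_c - a), valid', odd)
      else descentA k fuel (m + 1) a b (c + 1) (PySem.Int.floordiv n 2) valid' odd
    else
      let b' := 3 * b + pvPow2 c
      let two_c := pvPow2 c
      if two_c > 3 * a then
        some (m, 3 * a, b', c, PySem.Int.floordiv (b' + two_c - 3 * a - 1) (two_c - 3 * a), valid', odd + 1)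
      else descentA k fuel (m + 1) (3 * a) b' c (3 * n + 1) valid' (odd + 1)

def loopA (r : Int) : List Int → Option Int × Option (Int × Int × Int × Int × Int × Bool × Int)
  | [] => (none, none)
  | k :: ks =>
    let rep := PySem.Int.mod r (pvPow2 k)
    if PySem.Int.mod rep 2 = 0 then loopA r ks
    else
      match descentA k 10000 1 1 0 0 rep true 0 with
      | some res => if res.2.2.2.2.2.1 then (some k, some res) else loopA r ks
      | none => loopA r ks

def find_valid_k (r : Int) (k_min : Int) (max_k : Int) :
    Option Int × (Option (Int × Int × Int × Int × Int × Bool × Int)) :=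
  loopA r (PySem.List.pyRange k_min (max_k + 1) 1)

-- ===== PORT B =====
-- 3 ** o for a nonnegative count o
def pvPow3 (o : Int) : Int := (3 : Int) ^ o.toNat

-- _trajectory: the parity list (True = even step) of the descent of n, stopping at the
-- first step after which 2^c > 3^o; fuel = max_steps - len(pars)
def trajB : Nat → Int → Int → Int → List Bool → Option (List Bool)
  | 0, _, _, _, _ => none
  | fuel+1, n, c, o, pars =>
    if PySem.Int.mod n 2 = 0 then
      if pvPow2 (c + 1) > pvPow3 o then some (pars ++ [true])
      else trajB fuel (PySem.Int.floordiv n 2) (c + 1) o (pars ++ [true])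
    else
      if pvPow2 c > pvPow3 (o + 1) then some (pars ++ [false])
      else trajB fuel (3 * n + 1) c (o + 1) (pars ++ [false])

-- the second pass of B: one parity folded into the state (a, b, c, odd)
def foldStep (s : Int × Int × Int × Int) (p : Bool) : Int × Int × Int × Int :=
  if p then (s.1, s.2.1, s.2.2.1 + 1, s.2.2.2)
  else (3 * s.1, 3 * s.2.1 + pvPow2 s.2.2.1, s.2.2.1, s.2.2.2 + 1)

def loopB (r : Int) : List Int → Option Int × Option (Int × Int × Int × Int × Int × Bool × Int)
  | [] => (none, none)
  | k :: ks =>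
    let rep := PySem.Int.mod r (pvPow2 k)
    match trajB 10000 rep 0 0 [] with
    | none => loopB r ks
    | some pars =>
      let s := pars.foldl foldStep (1, 0, 0, 0)
      let c_last := match PySem.List.pyGet? pars (-1) with
        | some true => s.2.2.1 - 1
        | _ => s.2.2.1
      if c_last < k then
        let two_c := pvPow2 s.2.2.1
        (some k, some ((pars.length : Int), s.1, s.2.1, s.2.2.1,
          PySem.Int.floordiv (s.2.1 + two_c - s.1 - 1) (two_c - s.1), true, s.2.2.2))
      else loopB r ks

def find_valid_k_alt (r : Int) (k_min : Int) (max_k : Int) :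
    Option Int × (Option (Int × Int × Int × Int × Int × Bool × Int)) :=
  if PySem.Int.mod r 2 = 0 then (none, none)
  else loopB r (PySem.List.pyRange (max k_min 1) (max_k + 1) 1)

-- ===== PRECONDITION & SPEC =====
-- Pre_ excludes exactly the inputs on which A raises ValueError: a negative k in
-- range(k_min, max_k+1) makes '1 << k' a negative shift.
def Pre_find_valid_k (r : Int) (k_min : Int) (max_k : Int) : Prop :=
  0 ≤ k_min ∨ max_k < k_min
instance (r : Int) (k_min : Int) (max_k : Int) : Decidable (Pre_find_valid_k r k_min max_k) := by
  unfold Pre_find_valid_k; infer_instance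

def pvWitness_find_valid_k : Int × Int × Int := (27, 4, 8)

def Spec_find_valid_k (r : Int) (k_min : Int) (max_k : Int) (out : Option Int × (Option (Int × Int × Int × Int × Int × Bool × Int))) : Prop := out = find_valid_k_alt r k_min max_k
instance (r : Int) (k_min : Int) (max_k : Int) (out : Option Int × (Option (Int × Int × Int × Int × Int × Bool × Int))) : Decidable (Spec_find_valid_k r k_min max_k out) := by
  unfold Spec_find_valid_k
  haveI h2 : DecidableEq (Bool × Int) := instDecidableEqProd
  haveI h3 : DecidableEq (Int × Bool × Int) := instDecidableEqProd
  haveI h4 : DecidableEq (Int × Int × Bool × Int) := instDecidableEqProd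
  haveI h5 : DecidableEq (Int × Int × Int × Bool × Int) := instDecidableEqProd
  haveI h6 : DecidableEq (Int × Int × Int × Int × Bool × Int) := instDecidableEqProd
  haveI h7 : DecidableEq (Int × Int × Int × Int × Int × Bool × Int) := instDecidableEqProd
  infer_instance

-- ===== CLAIM (what is proved, stated in full; the proofs are below) =====
def Claim_equal_find_valid_k : Prop := ∀ (r : Int) (k_min : Int) (max_k : Int), Dom_find_valid_k r k_min max_k → Pre_find_valid_k r k_min max_k → Spec_find_valid_k r k_min max_k (find_valid_k r k_min max_k)


-- ===== LEMMAS AND PROOFS =====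

-- proof-only middle form: the descent without the validity flag; the last component is
-- c at the start of the terminating iteration (the largest c the flag check ever sees)
def descentCore : Nat → Int → Int → Int → Int → Int → Int →
    Option (Int × Int × Int × Int × Int × Int × Int)
  | 0, _, _, _, _, _, _ => none
  | fuel+1, m, a, b, c, n, odd =>
    if PySem.Int.mod n 2 = 0 then
      let two_c := pvPow2 (c + 1)
      if two_c > a then
        some (m, a, b, c + 1, PySem.Int.floordiv (b + two_c - a - 1) (two_c - a), odd, c)
      else descentCore fuel (m + 1) a b (c + 1) (PySem.Int.floordiv n 2) odd
    else
      let b' := 3 * b + pvPow2 c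
      let two_c := pvPow2 c
      if two_c > 3 * a then
        some (m, 3 * a, b', c, PySem.Int.floordiv (b' + two_c - 3 * a - 1) (two_c - 3 * a), odd + 1, c)
      else descentCore fuel (m + 1) (3 * a) b' c (3 * n + 1) (odd + 1)

theorem pvPow2_eq_pow (k : Int) : pvPow2 k = 2 ^ k.toNat := by
  simp [pvPow2, Nat.shiftLeft_eq]

-- descentCore never decreases c, so the last checked c is the largest checked c
theorem descentCore_cs_ge : ∀ (fuel : Nat) (m a b c n odd : Int)
    (t : Int × Int × Int × Int × Int × Int × Int),
    descentCore fuel m a b c n odd = some t → c ≤ t.2.2.2.2.2.2 := by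
  intro fuel
  induction fuel with
  | zero => intro m a b c n odd t h; simp [descentCore] at h
  | succ fuel ih =>
    intro m a b c n odd t h
    rw [descentCore] at h
    by_cases hn : PySem.Int.mod n 2 = 0
    · rw [if_pos hn] at h
      dsimp only at h
      split at h
      · cases h; simp
      · have := ih _ _ _ _ _ _ _ h; omega
    · rw [if_neg hn] at h
      dsimp only at h
      split at h
      · cases h; simp
      · exact ih _ _ _ _ _ _ _ h

-- compute_descent = descentCore + a final comparison of the last checked c with k
theorem descentA_eq_core : ∀ (fuel : Nat) (k m a b c n odd : Int) (valid : Bool),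
    descentA k fuel m a b c n valid odd =
      Option.map (fun t => (t.1, t.2.1, t.2.2.1, t.2.2.2.1, t.2.2.2.2.1,
        valid && decide (t.2.2.2.2.2.2 < k), t.2.2.2.2.2.1))
        (descentCore fuel m a b c n odd) := by
  intro fuel
  induction fuel with
  | zero => intro k m a b c n odd valid; simp [descentA, descentCore]
  | succ fuel ih =>
    intro k m a b c n odd valid
    rw [descentA, descentCore]
    by_cases hn : PySem.Int.mod n 2 = 0
    · rw [if_pos hn, if_pos hn]
      dsimp only
      by_cases hterm : pvPow2 (c + 1) > a
      · rw [if_pos hterm, if_pos hterm]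
        simp only [Option.map_some]
        by_cases hk : k ≤ c
        · have : ¬ ((c : Int) < k) := by omega
          simp [hk, this]
        · have : (c : Int) < k := by omega
          simp [hk, this]
      · rw [if_neg hterm, if_neg hterm, ih]
        rcases h : descentCore fuel (m + 1) a b (c + 1) (PySem.Int.floordiv n 2) odd with _ | t
        · simp
        · have hcs := descentCore_cs_ge _ _ _ _ _ _ _ _ h
          simp only [Option.map_some]
          by_cases hk : k ≤ c
          · have : ¬ (t.2.2.2.2.2.2 < k) := by omega
            simp [hk, this]
          · simp [hk]
    · rw [if_neg hn, if_neg hn]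
      dsimp only
      by_cases hterm : pvPow2 c > 3 * a
      · rw [if_pos hterm, if_pos hterm]
        simp only [Option.map_some]
        by_cases hk : k ≤ c
        · have : ¬ ((c : Int) < k) := by omega
          simp [hk, this]
        · have : (c : Int) < k := by omega
          simp [hk, this]
      · rw [if_neg hterm, if_neg hterm, ih]
        rcases h : descentCore fuel (m + 1) (3 * a) (3 * b + pvPow2 c) c (3 * n + 1) (odd + 1) with _ | t
        · simp
        · have hcs := descentCore_cs_ge _ _ _ _ _ _ _ _ h
          simp only [Option.map_some]
          by_cases hk : k ≤ c
          · have : ¬ (t.2.2.2.2.2.2 < k) := by omega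
            simp [hk, this]
          · simp [hk]

-- B's post-processing of a finished trajectory, as used in loopB
def postB (ps : List Bool) : Int × Int × Int × Int × Int × Int × Int :=
  let s := ps.foldl foldStep (1, 0, 0, 0)
  let c_last := match PySem.List.pyGet? ps (-1) with
    | some true => s.2.2.1 - 1
    | _ => s.2.2.1
  ((ps.length : Int), s.1, s.2.1, s.2.2.1,
    PySem.Int.floordiv (s.2.1 + pvPow2 s.2.2.1 - s.1 - 1) (pvPow2 s.2.2.1 - s.1), s.2.2.2, c_last)

-- descentCore = trajectory first, then the fold (B's staging)
theorem core_eq_traj : ∀ (fuel : Nat) (n : Int) (pars : List Bool) (a b c odd : Int),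
    pars.foldl foldStep (1, 0, 0, 0) = (a, b, c, odd) →
    a = pvPow3 odd → 0 ≤ odd →
    descentCore fuel ((pars.length : Int) + 1) a b c n odd =
      Option.map postB (trajB fuel n c odd pars) := by
  intro fuel
  induction fuel with
  | zero => intro n pars a b c odd hf ha ho; simp [descentCore, trajB]
  | succ fuel ih =>
    intro n pars a b c odd hf ha ho
    rw [descentCore, trajB]
    have hf' : ∀ p, (pars ++ [p]).foldl foldStep (1, 0, 0, 0) = foldStep (a, b, c, odd) p := by
      intro p; rw [List.foldl_append, hf]; rfl
    have hp3 : pvPow3 (odd + 1) = 3 * pvPow3 odd := by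
      unfold pvPow3
      rw [(by omega : (odd + 1).toNat = odd.toNat + 1), pow_succ]
      ring
    by_cases hn : PySem.Int.mod n 2 = 0
    · rw [if_pos hn, if_pos hn]
      dsimp only
      rw [← ha]
      by_cases hterm : pvPow2 (c + 1) > a
      · rw [if_pos hterm, if_pos hterm]
        simp only [Option.map_some]
        unfold postB
        rw [hf' true]
        simp [foldStep, PySem.List.pyGet?_neg_one_append_singleton]
      · rw [if_neg hterm, if_neg hterm]
        have := ih (PySem.Int.floordiv n 2) (pars ++ [true]) a b (c + 1) odd
          (by rw [hf' true]; rfl) ha ho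
        rw [← this]
        congr 1
        simp
    · rw [if_neg hn, if_neg hn]
      dsimp only
      have h3a : pvPow3 (odd + 1) = 3 * a := by rw [hp3, ha]
      by_cases hterm : pvPow2 c > 3 * a
      · rw [if_pos hterm, if_pos (by rw [h3a]; exact hterm)]
        simp only [Option.map_some]
        unfold postB
        rw [hf' false]
        simp [foldStep, PySem.List.pyGet?_neg_one_append_singleton]
      · rw [if_neg hterm, if_neg (by rw [h3a]; exact hterm)]
        have := ih (3 * n + 1) (pars ++ [false]) (3 * a) (3 * b + pvPow2 c) c (odd + 1)
          (by rw [hf' false]; rfl) (by rw [hp3, ha]) (by omega)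
        rw [← this]
        congr 1
        simp

theorem mod_mod_pow2_even (r : Int) (t : Nat) (h : PySem.Int.mod r 2 = 0) :
    PySem.Int.mod (PySem.Int.mod r (2 ^ t)) 2 = 0 := by
  have h2 : (0:Int) < 2 := by omega
  have hp : (0:Int) < 2 ^ t := by positivity
  rw [PySem.Int.mod_eq_emod_of_pos h2] at h
  rw [PySem.Int.mod_eq_emod_of_pos h2, PySem.Int.mod_eq_emod_of_pos hp]
  cases t with
  | zero => simp
  | succ t =>
    rw [Int.emod_emod_of_dvd _ (dvd_pow_self (2:Int) (Nat.succ_ne_zero t))]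
    exact h

theorem mod_mod_pow2_odd (r : Int) (t : Nat) (ht : 1 ≤ t) (h : PySem.Int.mod r 2 = 1) :
    PySem.Int.mod (PySem.Int.mod r (2 ^ t)) 2 = 1 := by
  have h2 : (0:Int) < 2 := by omega
  have hp : (0:Int) < 2 ^ t := by positivity
  rw [PySem.Int.mod_eq_emod_of_pos h2] at h
  rw [PySem.Int.mod_eq_emod_of_pos h2, PySem.Int.mod_eq_emod_of_pos hp]
  rw [Int.emod_emod_of_dvd _ (dvd_pow_self (2:Int) (by omega : t ≠ 0))]
  exact h

-- for even r every residue is even, so A's loop skips every k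
theorem loopA_even (r : Int) (h : PySem.Int.mod r 2 = 0) :
    ∀ ks : List Int, loopA r ks = (none, none) := by
  intro ks
  induction ks with
  | nil => rfl
  | cons k ks ih =>
    rw [loopA]
    rw [pvPow2_eq_pow, if_pos (mod_mod_pow2_even r k.toNat h)]
    exact ih

theorem loops_eq (r : Int) (h1 : PySem.Int.mod r 2 = 1) :
    ∀ (ks : List Int), (∀ k ∈ ks, 1 ≤ k) → loopA r ks = loopB r ks := by
  intro ks
  induction ks with
  | nil => intro _; rfl
  | cons k ks ih =>
    intro hmem
    have hk1 : 1 ≤ k := hmem k List.mem_cons_self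
    have ihs := ih (fun x hx => hmem x (List.mem_cons_of_mem _ hx))
    rw [loopA, loopB]
    have hodd : PySem.Int.mod (PySem.Int.mod r (pvPow2 k)) 2 = 1 := by
      rw [pvPow2_eq_pow]; exact mod_mod_pow2_odd r k.toNat (by omega) h1
    rw [if_neg (by rw [hodd]; omega)]
    rw [descentA_eq_core]
    have hct := core_eq_traj 10000 (PySem.Int.mod r (pvPow2 k)) [] 1 0 0 0 rfl rfl le_rfl
    norm_num at hct
    rw [hct]
    rcases htr : trajB 10000 (PySem.Int.mod r (pvPow2 k)) 0 0 [] with _ | pars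
    · simpa using ihs
    · simp only [Option.map_some]
      unfold postB
      dsimp only
      by_cases hlt : (match PySem.List.pyGet? pars (-1) with
          | some true => (pars.foldl foldStep (1,0,0,0)).2.2.1 - 1
          | _ => (pars.foldl foldStep (1,0,0,0)).2.2.1) < k
      · simp only [hlt, decide_true, Bool.true_and]
        simp
      · simp only [hlt, decide_false, Bool.false_eq_true, if_false,
          Bool.and_false]
        simpa using ihs

theorem main_eq (r k_min max_k : Int) (hpre : Pre_find_valid_k r k_min max_k) :
    find_valid_k r k_min max_k = find_valid_k_alt r k_min max_k := by
  unfold find_valid_k find_valid_k_alt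
  by_cases heven : PySem.Int.mod r 2 = 0
  · rw [if_pos heven]; exact loopA_even r heven _
  · rw [if_neg heven]
    have h1 : PySem.Int.mod r 2 = 1 := by
      rw [PySem.Int.mod_eq_emod_of_pos (by omega : (0:Int) < 2)] at heven ⊢
      omega
    by_cases hempty : max_k + 1 ≤ k_min
    · rw [PySem.List.pyRange_one_eq_nil hempty,
        PySem.List.pyRange_one_eq_nil (by omega : max_k + 1 ≤ max k_min 1)]
      rfl
    · have hkm : 0 ≤ k_min := by rcases hpre with h | h; exact h; omega
      by_cases hk1 : 1 ≤ k_min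
      · rw [(by omega : max k_min 1 = k_min)]
        refine loops_eq r h1 _ (fun k hk => ?_)
        rw [PySem.List.mem_pyRange_one] at hk; omega
      · have hk0 : k_min = 0 := by omega
        subst hk0
        rw [(by omega : max (0:Int) 1 = 1)]
        rw [PySem.List.pyRange_one_cons (by omega : (0:Int) < max_k + 1)]
        rw [loopA]
        have : PySem.Int.mod (PySem.Int.mod r (pvPow2 0)) 2 = 0 := by
          rw [show pvPow2 0 = 1 from rfl, PySem.Int.mod_eq_emod_of_pos (by omega : (0:Int) < 1)]
          simp [PySem.Int.mod_eq_emod_of_pos (by omega : (0:Int) < 2)]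
        rw [if_pos this]
        refine loops_eq r h1 _ (fun k hk => ?_)
        rw [PySem.List.mem_pyRange_one] at hk; omega

-- ===== VERDICT (by name: the statement is the Claim_ definition above) =====
theorem find_valid_k_spec : Claim_equal_find_valid_k := by
  intro r k_min max_k _ hpre
  unfold Spec_find_valid_k
  exact main_eq r k_min max_k hpre
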